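-- pv_equiv track=rewrite | github.com/JackWesnitzer/CS0-W | assignments/Falling Apart/fallingapart.py | solution
-- ===== SOURCE A (Python) =====
-- def solution(pieces):
--
--     alice = 0 # alice starts with zero pieces
--     bob = 0 # bob starts with zero pieces
--
--     while pieces: # while there are still pieces left to choose from...
--         alice += max(pieces) # alice goes first, she chooses the highest value piece available, adds it to her pile
--         pieces.remove(max(pieces)) # remove the highest value piece from the pieces in the pile
--         if pieces: # if there are pieces left after alice takes her turn, bob chooses the highest value piece available
--             bob += max(pieces) # bob adds his piece to his pile
--             pieces.remove(max(pieces)) # removes the piece bob chose from the main pile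
--     return(alice, bob)
-- ===== SOURCE B (Python) =====
-- def solution(pieces):
--     # Note: unlike A, B does not mutate its argument (A empties the list).
--     alice, bob, alice_turn = 0, 0, True
--     for v in sorted(pieces, reverse=True):
--         if alice_turn:
--             alice += v
--         else:
--             bob += v
--         alice_turn = not alice_turn
--     return (alice, bob)
-- ===== Notes on version B (the rewrite author's own statement) =====
-- stated objective: faster
-- what changed: Replaces the repeated max()+remove() scan per turn (quadratic) by one descending sort followed by a single pass that alternates the running sums between Alice and Bob; B also leaves the input list unmutated where A empties it.
import Mathlib
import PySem

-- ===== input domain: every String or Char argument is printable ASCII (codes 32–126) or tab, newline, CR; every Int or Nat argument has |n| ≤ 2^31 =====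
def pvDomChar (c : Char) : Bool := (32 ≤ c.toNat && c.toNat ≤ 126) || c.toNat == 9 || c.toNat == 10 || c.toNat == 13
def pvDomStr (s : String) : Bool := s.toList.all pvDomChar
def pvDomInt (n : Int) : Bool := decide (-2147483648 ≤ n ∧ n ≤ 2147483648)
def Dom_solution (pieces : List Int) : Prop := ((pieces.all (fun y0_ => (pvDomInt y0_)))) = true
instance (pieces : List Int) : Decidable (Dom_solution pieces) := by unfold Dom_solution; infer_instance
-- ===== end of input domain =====

-- B replaces A's repeated max()+remove() scans with one descending sort and a single
-- alternating-sum pass (asymptotically faster); equivalence is about the RETURN value only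
-- (A empties its argument list in place, B leaves it untouched).


-- ===== PORT A =====
-- max(l) for nonempty l (PySem.List.max?; the default 0 is unreachable: the loop only
-- calls it on nonempty lists, guarded by the two emptiness tests below)
def pyMaxD (l : List Int) : Int := (PySem.List.max? l (fun y => y)).getD 0

-- termination helper cited by the port's decreasing_by
theorem pyMaxD_mem (l : List Int) (h : l ≠ []) : pyMaxD l ∈ l := by
  unfold pyMaxD
  cases hm : PySem.List.max? l (fun y => y) with
  | none => exact absurd ((PySem.List.max?_eq_none_iff l (fun y => y)).mp hm) h
  | some m => simpa using PySem.List.max?_mem hm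

-- the while loop of A: 'while pieces:' = the outer emptiness test; 'if pieces:' = the inner one;
-- pieces.remove(m) with m ∈ pieces is List.erase (PySem.List.remove?_eq_some_erase)
def solutionGo (pieces : List Int) (alice bob : Int) : Int × Int :=
  if h0 : pieces = [] then (alice, bob)       -- while pieces: (exit)
  else
    let m := pyMaxD pieces                    -- alice += max(pieces)
    let rest := pieces.erase m                -- pieces.remove(max(pieces))
    if h1 : rest = [] then (alice + m, bob)   -- if pieces: (false; loop re-tested, exits)
    else
      let m2 := pyMaxD rest                   -- bob += max(pieces)
      let rest2 := rest.erase m2              -- pieces.remove(max(pieces))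
      solutionGo rest2 (alice + m) (bob + m2)
  termination_by pieces.length
  decreasing_by
    have hm : pyMaxD pieces ∈ pieces := pyMaxD_mem pieces h0
    have hm2 : pyMaxD (pieces.erase (pyMaxD pieces)) ∈ pieces.erase (pyMaxD pieces) :=
      pyMaxD_mem _ h1
    have e1 := List.length_erase_of_mem hm
    have e2 := List.length_erase_of_mem hm2
    have hp : 0 < pieces.length := List.length_pos_iff.mpr h0
    simp only [e2, e1]
    omega

def solution (pieces : List Int) : Int × Int :=
  solutionGo pieces 0 0

-- ===== PORT B =====
-- for v in sorted(pieces, reverse=True): alternate the running sums, flipping alice_turn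
def solAltGo (s : List Int) (alice bob : Int) (aliceTurn : Bool) : Int × Int :=
  match s with
  | [] => (alice, bob)
  | v :: rest =>
    if aliceTurn then solAltGo rest (alice + v) bob false
    else solAltGo rest alice (bob + v) true

def solution_alt (pieces : List Int) : Int × Int :=
  solAltGo (PySem.List.sorted pieces (fun x => x) true) 0 0 true

-- ===== PRECONDITION & SPEC =====
def Spec_solution (pieces : List Int) (out : Int × Int) : Prop := out = solution_alt pieces
instance (pieces : List Int) (out : Int × Int) : Decidable (Spec_solution pieces out) := by unfold Spec_solution; infer_instance

-- ===== CLAIM (what is proved, stated in full; the proofs are below) =====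
def Claim_equal_solution : Prop := ∀ (pieces : List Int), Dom_solution pieces → Spec_solution pieces (solution pieces)

-- ===== LEMMAS AND PROOFS =====

-- every element is at most the max
theorem le_pyMaxD (l : List Int) (h : l ≠ []) : ∀ y ∈ l, y ≤ pyMaxD l := by
  unfold pyMaxD
  cases hm : PySem.List.max? l (fun y => y) with
  | none => exact absurd ((PySem.List.max?_eq_none_iff l (fun y => y)).mp hm) h
  | some m => simpa using PySem.List.max?_isMax hm

-- two descending-sorted lists with the same multiset are equal
theorem sortedDesc_unique (l ys : List Int) (hp : ys.Perm l)
    (hs : ys.Pairwise (fun a b => b ≤ a)) :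
    PySem.List.sorted l (fun x => x) true = ys := by
  have h1 : (PySem.List.sorted l (fun x => x) true).Perm ys :=
    (PySem.List.sorted_perm l (fun x => x) true).trans hp.symm
  exact h1.eq_of_pairwise
    (fun a b _ _ hab hba => le_antisymm hba hab)
    (PySem.List.sorted_pairwise_rev l (fun x => x)) hs

-- sorted-descending of a nonempty list is its max consed on sorted-descending of the rest
theorem sortedDesc_cons_max (l : List Int) (h : l ≠ []) :
    PySem.List.sorted l (fun y => y) true =
      pyMaxD l :: PySem.List.sorted (l.erase (pyMaxD l)) (fun y => y) true := by
  have hmem : pyMaxD l ∈ l := pyMaxD_mem l h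
  apply sortedDesc_unique
  · exact ((PySem.List.sorted_perm _ _ _).cons (pyMaxD l)).trans
      (List.perm_cons_erase hmem).symm
  · constructor
    · intro b hb
      have hb' : b ∈ l.erase (pyMaxD l) := (PySem.List.mem_sorted _ _ _ _).1 hb
      exact le_pyMaxD l h b (List.mem_of_mem_erase hb')
    · exact PySem.List.sorted_pairwise_rev _ _

-- the loop of A equals B's alternating pass over the descending sort, for any accumulators
theorem go_eq (n : Nat) : ∀ (l : List Int) (a b : Int), l.length ≤ n →
    solutionGo l a b = solAltGo (PySem.List.sorted l (fun x => x) true) a b true := by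
  induction n with
  | zero =>
    intro l a b hl
    have h0 : l = [] := List.length_eq_zero_iff.mp (Nat.le_zero.mp hl)
    subst h0
    simp [solutionGo, solAltGo, PySem.List.sorted]
  | succ n ih =>
    intro l a b hl
    by_cases h0 : l = []
    · subst h0; simp [solutionGo, solAltGo, PySem.List.sorted]
    · rw [sortedDesc_cons_max l h0, solutionGo, dif_neg h0]
      have e1 := List.length_erase_of_mem (pyMaxD_mem l h0)
      by_cases h1 : l.erase (pyMaxD l) = []
      · simp [h1, solAltGo, PySem.List.sorted]
      · rw [sortedDesc_cons_max _ h1]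
        simp only [dif_neg h1]
        rw [solAltGo]
        
        rw [solAltGo]
        simp only [Bool.false_eq_true]
        apply ih
        have e2 := List.length_erase_of_mem (pyMaxD_mem _ h1)
        have hp : 0 < l.length := List.length_pos_iff.mpr h0
        omega

-- ===== VERDICT (by name: the statement is the Claim_ definition above) =====
theorem solution_spec : Claim_equal_solution := by
  intro pieces _
  unfold Spec_solution solution solution_alt
  exact go_eq pieces.length pieces 0 0 le_rfl
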